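-- pv_equiv track=rewrite | github.com/vaibhavsrv/DSA | 401-binary-watch/binary-watch.py | readBinaryWatch
-- ===== SOURCE A (Python) =====
-- from typing import List
--
-- def readBinaryWatch(turnedOn: int) -> List[str]:
--     times = []
--     for hour in range(12):
--         for minutes in range(60):
--             hour_one = bin(hour).count('1')
--             minute_one = bin(minutes).count('1')
--             if hour_one+minute_one == turnedOn:
--                 times.append(f"{hour}:{minutes:02d}")
--     return times
-- ===== SOURCE B (Python) =====
-- def readBinaryWatch(turnedOn):
--     # Combinatorial enumeration: recursively choose exactly `turnedOn` of the ten
--     # LED weights (positions 0-3 = hour bits, 4-9 = minute bits), summing the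
--     # chosen weights, then keep the valid times and sort them numerically.
--     HOUR = [1, 2, 4, 8]
--     MINUTE = [1, 2, 4, 8, 16, 32]
--
--     def choose(j, k):
--         # all (hour, minute) sums obtainable by lighting exactly k of the last j LEDs
--         if k == 0:
--             return [(0, 0)]
--         if j == 0:
--             return []
--         i = 10 - j  # position of the first available LED
--         with_i = []
--         for h, m in choose(j - 1, k - 1):
--             if i < 4:
--                 with_i.append((h + HOUR[i], m))
--             else:
--                 with_i.append((h, m + MINUTE[i - 4]))
--         return with_i + choose(j - 1, k)
--
--     pairs = sorted(p for p in choose(10, turnedOn) if p[0] < 12 and p[1] < 60)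
--     return [f"{h}:{m:02d}" for h, m in pairs]
-- ===== Notes on version B (the rewrite author's own statement) =====
-- stated objective: alternative
-- what changed: B recursively enumerates the combinations of exactly turnedOn of the ten LED weights (a subset-sum recursion over LED positions), keeps the valid (hour, minute) sums and sorts them numerically, instead of A's scan over all clock times with a per-time string popcount filter.
import Mathlib
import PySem

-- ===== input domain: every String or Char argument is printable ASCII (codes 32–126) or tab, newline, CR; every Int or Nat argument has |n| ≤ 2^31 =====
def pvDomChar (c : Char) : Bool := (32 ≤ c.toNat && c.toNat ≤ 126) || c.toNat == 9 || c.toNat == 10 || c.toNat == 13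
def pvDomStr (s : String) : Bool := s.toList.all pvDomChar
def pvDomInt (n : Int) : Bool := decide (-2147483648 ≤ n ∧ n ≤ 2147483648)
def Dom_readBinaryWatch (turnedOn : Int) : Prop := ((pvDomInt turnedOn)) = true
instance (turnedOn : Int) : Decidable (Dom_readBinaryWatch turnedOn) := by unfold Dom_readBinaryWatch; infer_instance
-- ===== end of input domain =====

-- B recursively enumerates the combinations of exactly turnedOn of the ten LED weights and
-- sorts the valid (hour, minute) sums, instead of A's scan over every clock time with a
-- per-time popcount filter (objective: alternative).

-- port of bin(n).count('1') (used by A) and of the f-string f"{h}:{m:02d}"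
def popI (n : Int) : Int := ((PySem.Str.count (PySem.Int.pyBin n) "1" : Nat) : Int)
def pyFmtTime (h m : Int) : String :=
  PySem.Str.join "" [PySem.Int.toStr h, ":", PySem.Str.zfill (PySem.Int.toStr m) 2]

-- ===== PORT A =====
def readBinaryWatch (turnedOn : Int) : List String :=
  (PySem.List.pyRange 0 12 1).foldl (fun times hour =>
    (PySem.List.pyRange 0 60 1).foldl (fun times minutes =>
      if popI hour + popI minutes == turnedOn
      then times ++ [pyFmtTime hour minutes]
      else times) times) []

-- ===== PORT B =====
def hourW : List Int := [1, 2, 4, 8]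
def minuteW : List Int := [1, 2, 4, 8, 16, 32]

-- B's choose(j, k): all (hour, minute) sums obtainable by lighting exactly k of the
-- last j LED positions; the first available position is i = 10 - j.
def goB : Nat → Int → List (Int × Int)
  | j, k =>
    if k == 0 then [((0 : Int), (0 : Int))]
    else match j with
      | 0 => []
      | j + 1 =>
        let i := 9 - j
        ((goB j (k - 1)).map (fun p =>
          if i < 4 then (p.1 + hourW.getD i 0, p.2)
          else (p.1, p.2 + minuteW.getD (i - 4) 0)))
        ++ goB j k

def readBinaryWatch_alt (turnedOn : Int) : List String :=
  (PySem.List.sorted2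
      ((goB 10 turnedOn).filter (fun p => decide (p.1 < 12) && decide (p.2 < 60)))
      (·.1) (·.2)).map (fun p => pyFmtTime p.1 p.2)

-- ===== PRECONDITION & SPEC =====
def Spec_readBinaryWatch (turnedOn : Int) (out : List String) : Prop := out = readBinaryWatch_alt turnedOn
instance (turnedOn : Int) (out : List String) : Decidable (Spec_readBinaryWatch turnedOn out) := by unfold Spec_readBinaryWatch; infer_instance

-- ===== CLAIM (what is proved, stated in full; the proofs are below) =====
def Claim_equal_readBinaryWatch : Prop := ∀ (turnedOn : Int), Dom_readBinaryWatch turnedOn → Spec_readBinaryWatch turnedOn (readBinaryWatch turnedOn)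

-- ===== LEMMAS AND PROOFS =====

-- numeric popcount (n.bit_count()); A's string popcount agrees with it on the clock values
def bcI (n : Int) : Int := ((PySem.Int.bitCount n : Nat) : Int)

-- the (hour, minute) pairs in A's (lexicographic) order
def lexPairs : List (Int × Int) :=
  (PySem.List.pyRange 0 12 1).flatMap (fun h => (PySem.List.pyRange 0 60 1).map (fun m => (h, m)))

theorem map_filter_flatMap {α β γ : Type} (F : β → γ) (Q : β → Bool) (H : α → List β) (l : List α) :
    ((l.flatMap H).filter Q).map F = l.flatMap (fun a => ((H a).filter Q).map F) := by
  simp [List.filter_flatMap, List.map_flatMap]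

theorem flatMap_congr_mem {α β : Type} (f g : α → List β) :
    ∀ l : List α, (∀ a ∈ l, f a = g a) → l.flatMap f = l.flatMap g := by
  intro l
  induction l with
  | nil => intro _; rfl
  | cons a l ih =>
      intro h
      simp only [List.flatMap_cons]
      rw [h a (by simp), ih (fun a ha => h a (by simp [ha]))]

theorem popI_eq_bcI_small :
    (∀ h ∈ PySem.List.pyRange 0 12 1, popI h = bcI h)
      ∧ (∀ m ∈ PySem.List.pyRange 0 60 1, popI m = bcI m) := by
  constructor <;> (simp [popI, bcI, PySem.List.mem_pyRange_one]; decide)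

-- A's double loop is the lexicographic pair list, filtered by the LED count and formatted
set_option maxRecDepth 100000 in
theorem A_eq (t : Int) : readBinaryWatch t
    = (lexPairs.filter (fun p => bcI p.1 + bcI p.2 == t)).map (fun p => pyFmtTime p.1 p.2) := by
  unfold readBinaryWatch
  have hinner : (fun (times : List String) (hour : Int) =>
      (PySem.List.pyRange 0 60 1).foldl (fun times minutes =>
        if popI hour + popI minutes == t
        then times ++ [pyFmtTime hour minutes] else times) times)
      = fun times hour => times ++
        ((PySem.List.pyRange 0 60 1).filter (fun minutes => popI hour + popI minutes == t)).map
          (fun minutes => pyFmtTime hour minutes) := by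
    funext times hour
    exact PySem.List.foldl_append_if _ _ _ _
  rw [hinner, PySem.List.foldl_append_eq_flatMap, List.nil_append]
  unfold lexPairs
  rw [map_filter_flatMap]
  apply flatMap_congr_mem
  intro hour hh
  have hfil : List.filter ((fun p => bcI p.1 + bcI p.2 == t) ∘ fun m => (hour, m))
        (PySem.List.pyRange 0 60 1)
      = List.filter (fun minutes => popI hour + popI minutes == t)
        (PySem.List.pyRange 0 60 1) := by
    apply List.filter_congr
    intro m hm
    show (bcI hour + bcI m == t) = (popI hour + popI m == t)
    rw [popI_eq_bcI_small.1 hour hh, popI_eq_bcI_small.2 m hm]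
  rw [List.filter_map, List.map_map, hfil]
  rfl

-- every LED count over the clock values lies in [0, 8]
set_option maxRecDepth 100000 in
theorem bc_bounds_small :
    (∀ h ∈ PySem.List.pyRange 0 12 1, bcI h ≤ 3)
      ∧ (∀ m ∈ PySem.List.pyRange 0 60 1, bcI m ≤ 5) := by decide

theorem bc_bounds : ∀ p ∈ lexPairs, 0 ≤ bcI p.1 + bcI p.2 ∧ bcI p.1 + bcI p.2 ≤ 8 := by
  intro p hp
  unfold lexPairs at hp
  obtain ⟨h, hh, hp'⟩ := List.mem_flatMap.1 hp
  obtain ⟨m, hm, rfl⟩ := List.mem_map.1 hp'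
  have h1 := bc_bounds_small.1 h hh
  have h2 := bc_bounds_small.2 m hm
  have h3 : 0 ≤ bcI h := Int.natCast_nonneg _
  have h4 : 0 ≤ bcI m := Int.natCast_nonneg _
  exact ⟨by show 0 ≤ bcI h + bcI m; omega, by show bcI h + bcI m ≤ 8; omega⟩

theorem A_nil (t : Int) (h : t < 0 ∨ 8 < t) : readBinaryWatch t = [] := by
  rw [A_eq, List.map_eq_nil_iff, List.filter_eq_nil_iff]
  intro p hp
  have := bc_bounds p hp
  simp only [beq_iff_eq]
  omega

theorem goB_neg : ∀ (j : Nat) (k : Int), k < 0 → goB j k = [] := by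
  intro j
  induction j with
  | zero => intro k hk; rw [goB]; simp [show (k == 0) = false by simp; omega]
  | succ j ih =>
      intro k hk
      rw [goB]
      simp only [show (k == 0) = false by simp; omega, Bool.false_eq_true, if_false]
      rw [ih (k - 1) (by omega), ih k hk]
      rfl

theorem goB_big : ∀ (j : Nat) (k : Int), (j : Int) < k → goB j k = [] := by
  intro j
  induction j with
  | zero => intro k hk; rw [goB]; simp [show (k == 0) = false by simp; omega]
  | succ j ih =>
      intro k hk
      rw [goB]
      simp only [show (k == 0) = false by simp; omega, Bool.false_eq_true, if_false]
      rw [ih (k - 1) (by push_cast at hk ⊢; omega), ih k (by push_cast at hk ⊢; omega)]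
      rfl

theorem B_nil (t : Int) (h : t < 0 ∨ 10 < t) : readBinaryWatch_alt t = [] := by
  unfold readBinaryWatch_alt
  have hg : goB 10 t = [] := by
    rcases h with h | h
    · exact goB_neg 10 t h
    · exact goB_big 10 t (by push_cast; omega)
  rw [hg]
  rfl

-- for each admissible LED count, B's sorted combination sums are exactly A's filtered scan
set_option maxRecDepth 1000000 in
set_option maxHeartbeats 4000000 in
theorem eq_small : ∀ t ∈ PySem.List.pyRange 0 11 1,
    PySem.List.sorted2 ((goB 10 t).filter (fun p => decide (p.1 < 12) && decide (p.2 < 60))) (·.1) (·.2)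
      = lexPairs.filter (fun p => bcI p.1 + bcI p.2 == t) := by decide

-- ===== VERDICT (by name: the statement is the Claim_ definition above) =====
theorem readBinaryWatch_spec : Claim_equal_readBinaryWatch := by
  intro t _
  unfold Spec_readBinaryWatch
  by_cases h : 0 ≤ t ∧ t ≤ 10
  · unfold readBinaryWatch_alt
    rw [eq_small t (by simp [PySem.List.mem_pyRange_one]; omega), A_eq]
  · rw [A_nil t (by omega), B_nil t (by omega)]
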